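-- pv_equiv track=rewrite | github.com/a-shiro/Python-Exercises | Python Fundamentals/8. Text Processing/Exercise/08. Letters Change Numbers.py | data_breakdown
-- ===== SOURCE A (Python) =====
-- def data_breakdown(data):
--     for el in data:
--         number = ""
--         first_letter = ""
--         second_letter = ""
--         for char in el:
--
--             if char.isalpha():
--                 if first_letter == "":
--                     first_letter = char
--                 else:
--                     second_letter = char
--             elif char.isdigit():
--                 number += char
--
--         data.pop(0)
--         return number, first_letter ,second_letter
-- ===== SOURCE B (Python) =====
-- def _scan(el, lo, hi):
--     # Divide and conquer: returns (digits, leftmost_letter, rightmost_letter, letter_count)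
--     # for el[lo:hi]; halves are combined by concatenation / left-or-right choice.
--     if lo == hi:
--         return "", "", "", 0
--     if hi - lo == 1:
--         c = el[lo]
--         if c.isalpha():
--             return "", c, c, 1
--         if c.isdigit():
--             return c, "", "", 0
--         return "", "", "", 0
--     mid = (lo + hi) // 2
--     n1, f1, l1, k1 = _scan(el, lo, mid)
--     n2, f2, l2, k2 = _scan(el, mid, hi)
--     return n1 + n2, f1 if k1 else f2, l2 if k2 else l1, k1 + k2
--
--
-- def data_breakdown(data):
--     # Same pop(0) side effect on data; equivalence is about the return value.
--     if not data:
--         return None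
--     el = data.pop(0)
--     number, first, last, cnt = _scan(el, 0, len(el))
--     return number, first, (last if cnt >= 2 else "")
-- ===== Notes on version B (the rewrite author's own statement) =====
-- stated objective: alternative
-- what changed: Replaces A's single forward scan with a flag-based state machine by a divide-and-conquer recursion that splits the string in halves and combines (digits, leftmost letter, rightmost letter, letter count) monoidally, deriving second_letter from the count at the end.
-- outside the precondition, e.g. on data_breakdown([]): A returns None, B returns None
import Mathlib
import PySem

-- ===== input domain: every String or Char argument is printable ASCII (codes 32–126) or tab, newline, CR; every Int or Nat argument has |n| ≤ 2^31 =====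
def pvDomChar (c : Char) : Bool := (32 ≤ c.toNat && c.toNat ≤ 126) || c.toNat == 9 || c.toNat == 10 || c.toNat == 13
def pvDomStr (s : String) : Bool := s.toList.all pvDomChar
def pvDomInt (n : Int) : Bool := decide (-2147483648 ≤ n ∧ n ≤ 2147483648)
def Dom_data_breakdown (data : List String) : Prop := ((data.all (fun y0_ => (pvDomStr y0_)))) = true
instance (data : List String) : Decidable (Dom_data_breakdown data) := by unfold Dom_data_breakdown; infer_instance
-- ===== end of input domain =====

-- B replaces A's single forward scan (empty-string flag state machine) by a divide-and-conquer
-- recursion with a monoidal combine (alternative decomposition, no speed claim).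
-- Both Pythons pop data[0]; the equivalence proved here is about the RETURN value only.

-- ===== PORT A =====
-- A's inner loop over the characters of el, state = (number, first_letter, second_letter) as char lists
def pvLoopA : List Char → List Char × List Char × List Char → List Char × List Char × List Char
  | [], st => st
  | c :: cs, (number, firstL, secondL) =>
      if PySem.Chars.isalpha c then
        if firstL = [] then pvLoopA cs (number, [c], secondL)
        else pvLoopA cs (number, firstL, [c])
      else if PySem.Chars.isdigit c then pvLoopA cs (number ++ [c], firstL, secondL)
      else pvLoopA cs (number, firstL, secondL)

def data_breakdown (data : List String) : String × String × String :=
  match data with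
  | [] => ("", "", "")   -- Python A returns None here (falls off the for loop); excluded by Pre_
  | el :: _ =>
      match pvLoopA el.toList ([], [], []) with
      | (n, f, s) => (String.ofList n, String.ofList f, String.ofList s)

-- ===== PORT B =====
-- B's _scan(el, lo, hi): here on the sublist of characters (el[lo:hi]); mid = (lo+hi)//2
-- corresponds to splitting the sublist at half its length.
def pvScanB (cs : List Char) : List Char × List Char × List Char × Nat :=
  match cs with
  | [] => ([], [], [], 0)
  | [c] =>
      if PySem.Chars.isalpha c then ([], [c], [c], 1)
      else if PySem.Chars.isdigit c then ([c], [], [], 0)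
      else ([], [], [], 0)
  | c1 :: c2 :: rest =>
      let m := (c1 :: c2 :: rest).length / 2
      let r1 := pvScanB ((c1 :: c2 :: rest).take m)
      let r2 := pvScanB ((c1 :: c2 :: rest).drop m)
      (r1.1 ++ r2.1,
       (if r1.2.2.2 ≠ 0 then r1.2.1 else r2.2.1),
       (if r2.2.2.2 ≠ 0 then r2.2.2.1 else r1.2.2.1),
       r1.2.2.2 + r2.2.2.2)
  termination_by cs.length
  decreasing_by
    · simp only [List.length_take, List.length_cons]; omega
    · simp only [List.length_drop, List.length_cons]; omega

def data_breakdown_alt (data : List String) : String × String × String :=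
  match data with
  | [] => ("", "", "")   -- Python B returns None here; excluded by Pre_
  | el :: _ =>
      let r := pvScanB el.toList
      (String.ofList r.1, String.ofList r.2.1,
       if 2 ≤ r.2.2.2 then String.ofList r.2.2.1 else "")

-- ===== PRECONDITION & SPEC =====
-- Pre_ excludes the empty list, on which A returns None instead of a string triple.
def Pre_data_breakdown (data : List String) : Prop := data ≠ []
instance (data : List String) : Decidable (Pre_data_breakdown data) := by unfold Pre_data_breakdown; infer_instance
def pvWitness_data_breakdown : List String := ["a1b2c"]

def Spec_data_breakdown (data : List String) (out : String × String × String) : Prop := out = data_breakdown_alt data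
instance (data : List String) (out : String × String × String) : Decidable (Spec_data_breakdown data out) := by unfold Spec_data_breakdown; infer_instance

-- ===== CLAIM (what is proved, stated in full; the proofs are below) =====
def Claim_equal_data_breakdown : Prop := ∀ (data : List String), Dom_data_breakdown data → Pre_data_breakdown data → Spec_data_breakdown data (data_breakdown data)

-- ===== LEMMAS AND PROOFS =====

theorem alpha_not_digit (c : Char) (h : PySem.Chars.isalpha c) : PySem.Chars.isdigit c = false := by
  simp only [PySem.Chars.isalpha, PySem.Chars.isdigit, PySem.Chars.isupper, PySem.Chars.islower,
    Bool.or_eq_true, decide_eq_true_eq, Bool.and_eq_true, Char.le_def] at *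
  simp only [UInt32.le_iff_toNat_le, decide_eq_false_iff_not, Bool.and_eq_false_iff, not_le] at *
  have h0 : '0'.val.toNat = 48 := rfl
  have h9 : '9'.val.toNat = 57 := rfl
  have hA : 'A'.val.toNat = 65 := rfl
  have hZ : 'Z'.val.toNat = 90 := rfl
  have ha : 'a'.val.toNat = 97 := rfl
  have hz : 'z'.val.toNat = 122 := rfl
  omega

-- head / last of a char list as a [] / [c] list (proof-only helpers)
def pvHeadL (L : List Char) : List Char := match L.head? with | some c => [c] | none => []
def pvLastL (L : List Char) : List Char := match L.getLast? with | some c => [c] | none => []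

-- [last letter] or a default (proof-only helper for A's loop characterisation)
def pvLastOf (letters snd : List Char) : List Char :=
  match letters.getLast? with | some c => [c] | none => snd

theorem pvLastOf_of_ne_nil (L : List Char) (hL : L ≠ []) (x y : List Char) :
    pvLastOf L x = pvLastOf L y := by
  cases h : L.getLast? with
  | none => rw [List.getLast?_eq_none_iff] at h; exact absurd h hL
  | some c => simp [pvLastOf, h]

theorem pvLastOf_cons (c : Char) (L : List Char) (x : List Char) (hL : L ≠ []) :
    pvLastOf (c :: L) x = pvLastOf L x := by
  cases L with
  | nil => exact absurd rfl hL
  | cons d ds => simp [pvLastOf, List.getLast?_cons_cons]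

theorem pvLoopA_spec (cs : List Char) (num fst snd : List Char) :
    pvLoopA cs (num, fst, snd) =
      (num ++ cs.filter PySem.Chars.isdigit,
       (if fst = [] then (match (cs.filter PySem.Chars.isalpha).head? with | some c => [c] | none => []) else fst),
       (if (if fst = [] then 2 else 1) ≤ (cs.filter PySem.Chars.isalpha).length
        then pvLastOf (cs.filter PySem.Chars.isalpha) snd else snd)) := by
  induction cs generalizing num fst snd with
  | nil =>
    have hlast : pvLastOf [] snd = snd := rfl
    simp [pvLoopA, hlast]
  | cons c cs ih =>
    by_cases ha : PySem.Chars.isalpha c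
    · have hd := alpha_not_digit c ha
      by_cases hf : fst = []
      · subst hf
        simp only [pvLoopA, ha, if_true, ih, List.filter_cons, hd, Bool.false_eq_true, if_false,
          Prod.mk.injEq]
        refine ⟨trivial, ?_, ?_⟩
        · simp
        · simp only [List.length_cons]
          cases h' : cs.filter PySem.Chars.isalpha with
          | nil => simp
          | cons d ds =>
            rw [h'] at *
            have hne : (1:Nat) ≤ ds.length + 1 := by omega
            have hne2 : (2:Nat) ≤ ds.length + 1 + 1 := by omega
            simp only [pvLastOf_cons c (d :: ds) snd (by simp)]
            exact pvLastOf_of_ne_nil (d :: ds) (by simp) [c] snd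
      · simp only [pvLoopA, ha, if_true, if_neg hf, ih, List.filter_cons, hd, Bool.false_eq_true,
          if_false, Prod.mk.injEq]
        refine ⟨trivial, ?_, ?_⟩
        · simp
        · simp only [List.length_cons]
          cases h' : cs.filter PySem.Chars.isalpha with
          | nil => simp [pvLastOf]
          | cons d ds =>
            have hne : (1:Nat) ≤ ds.length + 1 := by omega
            simp only [
              pvLastOf_cons c (d :: ds) snd (by simp)]
            exact pvLastOf_of_ne_nil (d :: ds) (by simp) [c] snd
    · by_cases hdg : PySem.Chars.isdigit c
      · simp only [pvLoopA, ha, Bool.false_eq_true, if_false, hdg, if_true, ih, List.filter_cons]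
        simp
      · simp only [pvLoopA, ha, Bool.false_eq_true, if_false, hdg, ih, List.filter_cons]

theorem pvHeadL_append (L R : List Char) :
    pvHeadL (L ++ R) = if L ≠ [] then pvHeadL L else pvHeadL R := by
  cases L <;> simp [pvHeadL]

theorem pvLastL_append (L R : List Char) :
    pvLastL (L ++ R) = if R ≠ [] then pvLastL R else pvLastL L := by
  cases hR : R with
  | nil => simp [pvLastL]
  | cons d ds =>
    have : (d :: ds : List Char) ≠ [] := by simp
    simp [pvLastL, List.getLast?_append_of_ne_nil L this]

theorem pvScanB_spec (cs : List Char) :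
    pvScanB cs = (cs.filter PySem.Chars.isdigit,
                  pvHeadL (cs.filter PySem.Chars.isalpha),
                  pvLastL (cs.filter PySem.Chars.isalpha),
                  (cs.filter PySem.Chars.isalpha).length) := by
  match cs with
  | [] => simp [pvScanB, pvHeadL, pvLastL]
  | [c] =>
    by_cases ha : PySem.Chars.isalpha c
    · have hd := alpha_not_digit c ha
      simp [pvScanB, ha, hd, List.filter, pvHeadL, pvLastL]
    · by_cases hdg : PySem.Chars.isdigit c
      · simp [pvScanB, ha, hdg, List.filter, pvHeadL, pvLastL]
      · simp [pvScanB, ha, hdg, List.filter, pvHeadL, pvLastL]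
  | c1 :: c2 :: rest =>
    have ih1 := pvScanB_spec ((c1 :: c2 :: rest).take ((c1 :: c2 :: rest).length / 2))
    have ih2 := pvScanB_spec ((c1 :: c2 :: rest).drop ((c1 :: c2 :: rest).length / 2))
    rw [pvScanB, ih1, ih2]
    have hsplit : (c1 :: c2 :: rest).take ((c1 :: c2 :: rest).length / 2) ++
        (c1 :: c2 :: rest).drop ((c1 :: c2 :: rest).length / 2) = c1 :: c2 :: rest :=
      List.take_append_drop _ _
    set L := (c1 :: c2 :: rest).take ((c1 :: c2 :: rest).length / 2) with hL
    set R := (c1 :: c2 :: rest).drop ((c1 :: c2 :: rest).length / 2) with hR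
    have hfd : (c1 :: c2 :: rest).filter PySem.Chars.isdigit =
        L.filter PySem.Chars.isdigit ++ R.filter PySem.Chars.isdigit := by
      rw [← hsplit, List.filter_append]
    have hfa : (c1 :: c2 :: rest).filter PySem.Chars.isalpha =
        L.filter PySem.Chars.isalpha ++ R.filter PySem.Chars.isalpha := by
      rw [← hsplit, List.filter_append]
    by_cases h1 : L.filter PySem.Chars.isalpha = [] <;>
      by_cases h2 : R.filter PySem.Chars.isalpha = [] <;>
        simp [hfd, hfa, pvHeadL_append, pvLastL_append, h1, h2, List.length_eq_zero_iff]
  termination_by cs.length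
  decreasing_by
    · simp only [List.length_take, List.length_cons]; omega
    · simp only [List.length_drop, List.length_cons]; omega

-- ===== VERDICT (by name: the statement is the Claim_ definition above) =====
theorem data_breakdown_spec : Claim_equal_data_breakdown := by
  intro data _ hpre
  unfold Spec_data_breakdown
  match data with
  | [] => exact absurd rfl hpre
  | el :: rest =>
    simp only [data_breakdown, data_breakdown_alt, pvScanB_spec, pvLoopA_spec]
    by_cases h2 : 2 ≤ (el.toList.filter PySem.Chars.isalpha).length
    · obtain ⟨d, hd⟩ : ∃ d, (el.toList.filter PySem.Chars.isalpha).getLast? = some d := by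
        cases h : (el.toList.filter PySem.Chars.isalpha).getLast? with
        | none => rw [List.getLast?_eq_none_iff] at h; rw [h] at h2; simp at h2
        | some d => exact ⟨d, rfl⟩
      simp [pvLastOf, pvLastL, pvHeadL, hd, h2]
    · simp [pvHeadL, h2]
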